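-- pv_equiv track=rewrite | github.com/gucker40/Collective-Build-Phases | v2A-7-extracted/logos/backend/models.py | _trim_for_groq
-- ===== SOURCE A (Python) =====
-- def _trim_for_groq(messages: list, max_chars: int = 24000) -> list:
--     """Trim message history to stay under Groq token limits (~8k tokens ~ 32k chars).
--     Always keeps system message (index 0) and trims oldest non-system messages first."""
--     total = sum(len(m.get("content","")) for m in messages)
--     if total <= max_chars:
--         return messages
--     # Keep system message, trim from oldest user/assistant messages
--     system = [m for m in messages if m["role"] == "system"]
--     conv    = [m for m in messages if m["role"] != "system"]
--     while conv and sum(len(m.get("content","")) for m in system+conv) > max_chars: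
--         conv.pop(0)
--     # Also truncate any single message that is still very long
--     result = []
--     for m in system + conv:
--         if len(m.get("content","")) > 6000:
--             result.append({**m, "content": m["content"][:6000] + "…[trimmed]"})
--         else:
--             result.append(m)
--     return result
-- ===== SOURCE B (Python) =====
-- def _trim_for_groq(messages: list, max_chars: int = 24000) -> list:
--     """One-pass rewrite: partition once, then drop oldest conversation messages
--     by decrementing a running total instead of re-summing the list each pop."""
--     total = sum(len(m.get("content", "")) for m in messages)
--     if total <= max_chars:
--         return messages
--     system, conv = [], []
--     for m in messages:
--         if m["role"] == "system":
--             system.append(m)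
--         else:
--             conv.append(m)
--     i = 0
--     while i < len(conv) and total > max_chars:
--         total -= len(conv[i].get("content", ""))
--         i += 1
--     return [_truncate_long(m) for m in system + conv[i:]]
--
--
-- def _truncate_long(m: dict) -> dict:
--     c = m.get("content", "")
--     if len(c) > 6000:
--         return {**m, "content": c[:6000] + "…[trimmed]"}
--     return m
-- ===== Notes on version B (the rewrite author's own statement) =====
-- stated objective: alternative
-- what changed: Single partition pass plus a running total decremented per dropped message replace A's while-loop that re-sums all message lengths and pops from the list front on every iteration; the final truncation is a list comprehension instead of an append loop.
import Mathlib
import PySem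

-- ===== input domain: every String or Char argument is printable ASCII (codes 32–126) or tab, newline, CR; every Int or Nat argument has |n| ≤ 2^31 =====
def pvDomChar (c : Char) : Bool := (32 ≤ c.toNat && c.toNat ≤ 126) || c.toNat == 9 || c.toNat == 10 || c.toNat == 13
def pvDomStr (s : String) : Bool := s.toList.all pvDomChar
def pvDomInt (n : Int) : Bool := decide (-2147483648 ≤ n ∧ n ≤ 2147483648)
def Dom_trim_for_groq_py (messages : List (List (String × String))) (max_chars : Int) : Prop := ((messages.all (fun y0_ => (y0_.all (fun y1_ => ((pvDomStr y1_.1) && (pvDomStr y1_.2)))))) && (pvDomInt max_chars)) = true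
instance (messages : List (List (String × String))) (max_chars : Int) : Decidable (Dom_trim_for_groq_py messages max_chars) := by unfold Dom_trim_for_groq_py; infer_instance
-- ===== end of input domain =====

-- B replaces A's pop(0)/re-sum trimming loop by a single partition pass and a running
-- total decremented per dropped message (objective: alternative, one-pass decomposition).


-- shared primitive wrappers: m.get("content",""), m.get("role",…) — dict lookups both Pythons perform
def pvContent (m : List (String × String)) : String := PySem.Dict.getD ⟨m⟩ "content" ""
def pvRole (m : List (String × String)) : String := PySem.Dict.getD ⟨m⟩ "role" ""
-- sum(len(m.get("content","")) for m in messages) — the first line of both Pythons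
def pvSumContent (ms : List (List (String × String))) : Int :=
  (ms.map (fun m => PySem.Str.len (pvContent m))).sum

-- ===== PORT A =====
-- while conv and sum(len(m.get("content","")) for m in system+conv) > max_chars: conv.pop(0)
def trimLoopA (system : List (List (String × String))) (max_chars : Int) :
    List (List (String × String)) → List (List (String × String))
  | [] => []
  | m :: rest =>
    if pvSumContent (system ++ m :: rest) > max_chars then trimLoopA system max_chars rest
    else m :: rest

def trim_for_groq_py (messages : List (List (String × String))) (max_chars : Int) : List (List (String × String)) :=
  let total := pvSumContent messages
  if total ≤ max_chars then messages
  else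
    let system := messages.filter (fun m => pvRole m == "system")
    let conv := messages.filter (fun m => !(pvRole m == "system"))
    let conv := trimLoopA system max_chars conv
    -- result = []; for m in system+conv: append (truncated or m)
    -- m["content"] here: the guard len(m.get("content","")) > 6000 guarantees the key is
    -- present with that same value, so getD is exact
    (system ++ conv).foldl
      (fun result m =>
        if PySem.Str.len (pvContent m) > 6000 then
          result ++ [(PySem.Dict.insert ⟨m⟩ "content"
            (PySem.Str.slice (pvContent m) none (some 6000) ++ "…[trimmed]")).items]
        else result ++ [m]) []

-- ===== PORT B =====
def truncLongB (m : List (String × String)) : List (String × String) :=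
  if PySem.Str.len (pvContent m) > 6000 then
    (PySem.Dict.insert ⟨m⟩ "content"
      (PySem.Str.slice (pvContent m) none (some 6000) ++ "…[trimmed]")).items
  else m

-- i = 0; while i < len(conv) and total > max_chars: total -= len(conv[i].get(...)); i += 1 ; conv[i:]
def dropLoopB (max_chars : Int) : Int → List (List (String × String)) → List (List (String × String))
  | _, [] => []
  | total, m :: rest =>
    if total > max_chars then dropLoopB max_chars (total - PySem.Str.len (pvContent m)) rest
    else m :: rest

def trim_for_groq_py_alt (messages : List (List (String × String))) (max_chars : Int) : List (List (String × String)) :=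
  let total := pvSumContent messages
  if total ≤ max_chars then messages
  else
    let sc := messages.foldl
      (fun (p : List (List (String × String)) × List (List (String × String))) m =>
        if pvRole m == "system" then (p.1 ++ [m], p.2) else (p.1, p.2 ++ [m])) ([], [])
    (sc.1 ++ dropLoopB max_chars total sc.2).map truncLongB

-- ===== PRECONDITION & SPEC =====
-- Pre_ excludes exactly the inputs where the Python A raises KeyError: total content length
-- over max_chars while some message lacks a "role" key (B raises there too).
def Pre_trim_for_groq_py (messages : List (List (String × String))) (max_chars : Int) : Prop :=
  pvSumContent messages ≤ max_chars ∨ ∀ m ∈ messages, ∃ p ∈ m, p.1 = "role"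
instance (messages : List (List (String × String))) (max_chars : Int) : Decidable (Pre_trim_for_groq_py messages max_chars) := by unfold Pre_trim_for_groq_py; infer_instance
def pvWitness_trim_for_groq_py : (List (List (String × String))) × Int :=
  ([[("role", "system"), ("content", "hello")], [("role", "user"), ("content", "hi")]], 3)

def Spec_trim_for_groq_py (messages : List (List (String × String))) (max_chars : Int) (out : List (List (String × String))) : Prop := out = trim_for_groq_py_alt messages max_chars
instance (messages : List (List (String × String))) (max_chars : Int) (out : List (List (String × String))) : Decidable (Spec_trim_for_groq_py messages max_chars out) := by unfold Spec_trim_for_groq_py; infer_instance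

-- ===== CLAIM (what is proved, stated in full; the proofs are below) =====
def Claim_equal_trim_for_groq_py : Prop := ∀ (messages : List (List (String × String))) (max_chars : Int), Dom_trim_for_groq_py messages max_chars → Pre_trim_for_groq_py messages max_chars → Spec_trim_for_groq_py messages max_chars (trim_for_groq_py messages max_chars)

-- ===== LEMMAS AND PROOFS =====

theorem pvSumContent_append (a b : List (List (String × String))) :
    pvSumContent (a ++ b) = pvSumContent a + pvSumContent b := by
  simp [pvSumContent]

theorem pvSumContent_filter_split (p : List (String × String) → Bool)
    (ms : List (List (String × String))) :
    pvSumContent (ms.filter p) + pvSumContent (ms.filter (fun m => !(p m))) = pvSumContent ms := by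
  induction ms with
  | nil => simp [pvSumContent]
  | cons m rest ih =>
    by_cases h : p m <;> simp [pvSumContent, h] at ih ⊢ <;> omega

theorem partition_foldl (ms s c : List (List (String × String))) :
    ms.foldl
      (fun (p : List (List (String × String)) × List (List (String × String))) m =>
        if pvRole m == "system" then (p.1 ++ [m], p.2) else (p.1, p.2 ++ [m])) (s, c)
    = (s ++ ms.filter (fun m => pvRole m == "system"),
       c ++ ms.filter (fun m => !(pvRole m == "system"))) := by
  induction ms generalizing s c with
  | nil => simp
  | cons m rest ih =>
    simp only [List.foldl_cons]
    rw [ih]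
    by_cases h : pvRole m = "system" <;> simp [h]

theorem trimLoopA_eq_dropLoopB (max_chars : Int) (system : List (List (String × String))) :
    ∀ conv, trimLoopA system max_chars conv
      = dropLoopB max_chars (pvSumContent system + pvSumContent conv) conv := by
  intro conv
  induction conv with
  | nil => rfl
  | cons m rest ih =>
    have hs : pvSumContent (system ++ m :: rest)
        = pvSumContent system + (PySem.Str.len (pvContent m) + pvSumContent rest) := by
      rw [pvSumContent_append]; simp [pvSumContent]
    have hc : pvSumContent (m :: rest)
        = PySem.Str.len (pvContent m) + pvSumContent rest := by simp [pvSumContent]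
    simp only [trimLoopA, dropLoopB, hs, hc, ← add_assoc]
    split_ifs with h
    · rw [ih]; congr 1; ring
    · rfl

theorem foldl_trunc_eq_map (ms r : List (List (String × String))) :
    ms.foldl
      (fun result m =>
        if PySem.Str.len (pvContent m) > 6000 then
          result ++ [(PySem.Dict.insert ⟨m⟩ "content"
            (PySem.Str.slice (pvContent m) none (some 6000) ++ "…[trimmed]")).items]
        else result ++ [m]) r
    = r ++ ms.map truncLongB := by
  induction ms generalizing r with
  | nil => simp
  | cons m rest ih =>
    simp only [List.foldl_cons]
    rw [ih]
    split_ifs with h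
    · simp only [List.map_cons, truncLongB, if_pos h]; simp
    · simp only [List.map_cons, truncLongB, if_neg h]; simp

-- ===== VERDICT (by name: the statement is the Claim_ definition above) =====
theorem trim_for_groq_py_spec : Claim_equal_trim_for_groq_py := by
  intro messages max_chars _ _
  unfold Spec_trim_for_groq_py trim_for_groq_py trim_for_groq_py_alt
  by_cases h : pvSumContent messages ≤ max_chars
  · simp [h]
  · simp only [h, if_false]
    rw [partition_foldl, foldl_trunc_eq_map]
    simp only [List.nil_append]
    rw [trimLoopA_eq_dropLoopB,
      pvSumContent_filter_split (fun m => pvRole m == "system") messages]
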